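-- pv_equiv track=rewrite | github.com/JohnScolaro/google-kickstart | 2021/round_a/3.py | create_safe_puzzle
-- ===== SOURCE A (Python) =====
-- from collections import defaultdict
--
-- def manhatten_dist(p1, p2):
--     return abs(p1[0] - p2[0]) + abs(p1[1] - p2[1])
--
-- def create_safe_puzzle(puzzle: list) -> list:
--     rows = len(puzzle)
--     cols = len(puzzle[0])
--
--     locs_not_to_try = set()
--     d = defaultdict(list)
--
--     for r in range(rows):
--         for c in range(cols):
--             d[puzzle[r][c]].append((r, c))
--
--     l = list(d.items())
--     l.sort(key=lambda x: -x[0])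
--
--     for h in l:
--         for r, c in h[1]:
--             if (r, c) not in locs_not_to_try:
--                 v = puzzle[r][c]
--                 for r2 in range(rows):
--                     for c2 in range(cols):
--                         current_value = puzzle[r2][c2]
--                         min_safe_value = v - manhatten_dist((r, c), (r2, c2))
--                         if min_safe_value >= current_value:
--                             puzzle[r2][c2] = min_safe_value
--                             locs_not_to_try.add((r2, c2))
--     return puzzle
-- ===== SOURCE B (Python) =====
-- def create_safe_puzzle(puzzle: list) -> list:
--     rows = len(puzzle)
--     cols = len(puzzle[0])
--     vals = [[puzzle[r][c] for c in range(cols)] for r in range(rows)]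
--     for r in range(rows):
--         for c in range(cols):
--             puzzle[r][c] = max(vals[r2][c2] - abs(r - r2) - abs(c - c2)
--                                for r2 in range(rows) for c2 in range(cols))
--     return puzzle
-- ===== Notes on version B (the rewrite author's own statement) =====
-- stated objective: simpler
-- what changed: Replaces the sorted-by-value greedy propagation with its dict, sort and visited-set (repeated full-grid relaxation passes) by a direct per-cell formula: each cell becomes the maximum of value minus Manhattan distance over a snapshot of the original grid.
import Mathlib
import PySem

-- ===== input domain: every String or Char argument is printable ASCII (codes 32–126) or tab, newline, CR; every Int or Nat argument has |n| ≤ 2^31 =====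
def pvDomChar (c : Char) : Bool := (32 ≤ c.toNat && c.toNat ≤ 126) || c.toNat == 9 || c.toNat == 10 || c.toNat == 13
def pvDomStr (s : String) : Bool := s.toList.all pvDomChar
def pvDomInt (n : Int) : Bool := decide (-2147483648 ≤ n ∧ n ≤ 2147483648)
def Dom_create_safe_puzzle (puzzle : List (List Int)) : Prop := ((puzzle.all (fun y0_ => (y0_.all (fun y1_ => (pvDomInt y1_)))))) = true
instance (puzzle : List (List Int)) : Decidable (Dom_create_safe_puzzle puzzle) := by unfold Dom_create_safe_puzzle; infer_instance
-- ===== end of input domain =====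

-- B replaces A's sorted greedy propagation by the direct per-cell max of (value − Manhattan
-- distance) over a snapshot of the original grid: simpler (no dict/sort/visited-set), same
-- worst-case cost. Both A and B mutate `puzzle` in place in Python; the equivalence proved
-- here is about the returned value.

-- ===== PORT A =====
def manhatten_dist (p1 p2 : Int × Int) : Int :=
  |p1.1 - p2.1| + |p1.2 - p2.2|

def create_safe_puzzle (puzzle : List (List Int)) : List (List Int) :=
  let rows : Int := puzzle.length
  let cols : Int := (PySem.List.pyGetD puzzle 0 []).length
  -- d = defaultdict(list); for r … for c …: d[puzzle[r][c]].append((r, c))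
  let d : PySem.Dict Int (List (Int × Int)) :=
    (PySem.List.pyRange 0 rows 1).foldl (fun d r =>
      (PySem.List.pyRange 0 cols 1).foldl (fun d c =>
        d.modify (PySem.List.pyGetD (PySem.List.pyGetD puzzle r []) c 0) [] (· ++ [(r, c)])) d)
      PySem.Dict.empty
  -- l = list(d.items()); l.sort(key=lambda x: -x[0])
  let l := PySem.List.sorted d.items (fun x => -x.1) false
  -- greedy propagation with the locs_not_to_try set
  let st :=
    l.foldl (fun st h =>
      h.2.foldl (fun st rc =>
        if PySem.Set.contains st.2 rc then st
        else
          let v := PySem.List.pyGetD (PySem.List.pyGetD st.1 rc.1 []) rc.2 0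
          (PySem.List.pyRange 0 rows 1).foldl (fun st r2 =>
            (PySem.List.pyRange 0 cols 1).foldl (fun st c2 =>
              let current := PySem.List.pyGetD (PySem.List.pyGetD st.1 r2 []) c2 0
              let ms := v - manhatten_dist rc (r2, c2)
              if current ≤ ms then
                (PySem.List.pySetD st.1 r2 (PySem.List.pySetD (PySem.List.pyGetD st.1 r2 []) c2 ms),
                 PySem.Set.add st.2 (r2, c2))
              else st) st) st) st)
      (puzzle, (PySem.Set.empty : PySem.Set (Int × Int)))
  st.1

-- ===== PORT B =====
-- max(<generator>) over a non-empty sequence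
def pymax (xs : List Int) : Int :=
  match xs with
  | [] => 0
  | a :: t => t.foldl max a

def create_safe_puzzle_alt (puzzle : List (List Int)) : List (List Int) :=
  let rows : Int := puzzle.length
  let cols : Int := (PySem.List.pyGetD puzzle 0 []).length
  -- vals = [[puzzle[r][c] for c in range(cols)] for r in range(rows)]
  let vals : List (List Int) :=
    (PySem.List.pyRange 0 rows 1).map (fun r =>
      (PySem.List.pyRange 0 cols 1).map (fun c =>
        PySem.List.pyGetD (PySem.List.pyGetD puzzle r []) c 0))
  -- for r … for c …: puzzle[r][c] = max(vals[r2][c2] - |r-r2| - |c-c2| for r2 … for c2 …)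
  (PySem.List.pyRange 0 rows 1).foldl (fun g r =>
    (PySem.List.pyRange 0 cols 1).foldl (fun g c =>
      PySem.List.pySetD g r (PySem.List.pySetD (PySem.List.pyGetD g r []) c
        (pymax ((PySem.List.pyRange 0 rows 1).flatMap (fun r2 =>
          (PySem.List.pyRange 0 cols 1).map (fun c2 =>
            PySem.List.pyGetD (PySem.List.pyGetD vals r2 []) c2 0 - |r - r2| - |c - c2|)))))) g) puzzle

-- ===== PRECONDITION & SPEC =====
-- Pre_ = exactly the inputs where the Python A returns: a non-empty list whose every row is at
-- least as long as the first (otherwise A raises IndexError on puzzle[0] / puzzle[r][c]).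
def Pre_create_safe_puzzle (puzzle : List (List Int)) : Prop :=
  puzzle ≠ [] ∧ ∀ row ∈ puzzle, (puzzle.getD 0 []).length ≤ row.length
instance (puzzle : List (List Int)) : Decidable (Pre_create_safe_puzzle puzzle) := by
  unfold Pre_create_safe_puzzle; infer_instance

def pvWitness_create_safe_puzzle : List (List Int) := [[1, 2], [5, 3]]

def Spec_create_safe_puzzle (puzzle : List (List Int)) (out : List (List Int)) : Prop :=
  out = create_safe_puzzle_alt puzzle
instance (puzzle : List (List Int)) (out : List (List Int)) : Decidable (Spec_create_safe_puzzle puzzle out) := by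
  unfold Spec_create_safe_puzzle; infer_instance

-- ===== CLAIM (what is proved, stated in full; the proofs are below) =====
def Claim_equal_create_safe_puzzle : Prop := ∀ (puzzle : List (List Int)), Dom_create_safe_puzzle puzzle → Pre_create_safe_puzzle puzzle → Spec_create_safe_puzzle puzzle (create_safe_puzzle puzzle)

-- ===== LEMMAS AND PROOFS =====

-- dimensions, cell access, and the closure value both programs compute
def pvRw (P : List (List Int)) : Nat := P.length
def pvCl (P : List (List Int)) : Nat := (P.getD 0 []).length
def getC (g : List (List Int)) (r c : Nat) : Int := (g.getD r []).getD c 0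
def setC (g : List (List Int)) (r c : Nat) (x : Int) : List (List Int) :=
  g.set r ((g.getD r []).set c x)
def distN (p : Int × Int) (r c : Nat) : Int := |p.1 - (r : Int)| + |p.2 - (c : Int)|

def cloL (P : List (List Int)) (r c : Nat) : List Int :=
  (List.range (pvRw P)).flatMap (fun r2 =>
    (List.range (pvCl P)).map (fun c2 => getC P r2 c2 - |(r : Int) - (r2 : Int)| - |(c : Int) - (c2 : Int)|))
def clo (P : List (List Int)) (r c : Nat) : Int := pymax (cloL P r c)

def ShapeOf (P g : List (List Int)) : Prop :=
  g.length = P.length ∧ ∀ r : Nat, (g.getD r []).length = (P.getD r []).length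
def Wide (P : List (List Int)) : Prop :=
  ∀ r : Nat, r < pvRw P → pvCl P ≤ (P.getD r []).length

theorem shape_refl (P : List (List Int)) : ShapeOf P P := ⟨rfl, fun _ => rfl⟩

theorem getD_set' {α : Type} (l : List α) (i : Nat) (a : α) (j : Nat) (d : α) :
    (l.set i a).getD j d = if i = j ∧ i < l.length then a else l.getD j d := by
  simp only [List.getD, List.getElem?_set]
  split_ifs with h1 h2 h3 h3 <;> simp_all <;> omega

theorem shape_setC {P g : List (List Int)} (h : ShapeOf P g) (r c : Nat) (x : Int) :
    ShapeOf P (setC g r c x) := by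
  refine ⟨by simp [setC, h.1], fun r' => ?_⟩
  rw [setC, getD_set']
  split_ifs with hif
  · rw [List.length_set, ← hif.1]; exact h.2 r
  · exact h.2 r'

theorem getC_setC_self {g : List (List Int)} {r c : Nat} (x : Int)
    (hr : r < g.length) (hc : c < (g.getD r []).length) :
    getC (setC g r c x) r c = x := by
  unfold getC setC
  rw [getD_set', if_pos ⟨rfl, hr⟩, getD_set', if_pos ⟨rfl, hc⟩]

theorem getC_setC_ne {g : List (List Int)} {r c r' c' : Nat} (x : Int)
    (h : ¬(r' = r ∧ c' = c)) :
    getC (setC g r c x) r' c' = getC g r' c' := by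
  unfold getC setC
  rw [getD_set']
  split_ifs with hif
  · have hc : ¬ c = c' := fun hcc => h ⟨hif.1.symm, hcc.symm⟩
    rw [getD_set', if_neg (fun hh => hc hh.1), hif.1]
  · rfl

-- pymax = Python max() on a non-empty list
theorem le_pymax (xs : List Int) (x : Int) (hx : x ∈ xs) : x ≤ pymax xs := by
  cases xs with
  | nil => cases hx
  | cons a t =>
    rcases List.mem_cons.mp hx with h | h
    · subst h; exact (PySem.List.le_foldl_max t x).1
    · exact (PySem.List.le_foldl_max t a).2 x h

theorem pymax_mem (xs : List Int) (h : xs ≠ []) : pymax xs ∈ xs := by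
  cases xs with
  | nil => exact absurd rfl h
  | cons a t =>
    rcases PySem.List.foldl_max_mem t a with h | h
    · rw [pymax, h]; exact List.mem_cons_self
    · exact List.mem_cons_of_mem a h

theorem mem_cloL_iff (P : List (List Int)) (r c : Nat) (x : Int) :
    x ∈ cloL P r c ↔ ∃ r2 c2 : Nat, r2 < pvRw P ∧ c2 < pvCl P ∧
      x = getC P r2 c2 - distN ((r : Int), (c : Int)) r2 c2 := by
  simp only [cloL, List.mem_flatMap, List.mem_map, List.mem_range, distN, sub_sub]
  constructor
  · rintro ⟨r2, hr2, c2, hc2, rfl⟩; exact ⟨r2, c2, hr2, hc2, rfl⟩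
  · rintro ⟨r2, c2, hr2, hc2, rfl⟩; exact ⟨r2, hr2, c2, hc2, rfl⟩

theorem le_clo {P : List (List Int)} {r2 c2 : Nat} (r c : Nat)
    (h2 : r2 < pvRw P) (h3 : c2 < pvCl P) :
    getC P r2 c2 - distN ((r : Int), (c : Int)) r2 c2 ≤ clo P r c :=
  le_pymax _ _ ((mem_cloL_iff P r c _).mpr ⟨r2, c2, h2, h3, rfl⟩)

theorem clo_le {P : List (List Int)} {M : Int} (r c : Nat)
    (hR : 0 < pvRw P) (hC : 0 < pvCl P)
    (h : ∀ r2 c2 : Nat, r2 < pvRw P → c2 < pvCl P →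
      getC P r2 c2 - distN ((r : Int), (c : Int)) r2 c2 ≤ M) :
    clo P r c ≤ M := by
  have hne : cloL P r c ≠ [] := by
    intro hnil
    have : (getC P 0 0 - distN ((r : Int), (c : Int)) 0 0) ∈ cloL P r c :=
      (mem_cloL_iff P r c _).mpr ⟨0, 0, hR, hC, rfl⟩
    rw [hnil] at this; cases this
  obtain ⟨r2, c2, h2, h3, hx⟩ := (mem_cloL_iff P r c _).mp (pymax_mem _ hne)
  rw [clo, hx]; exact h r2 c2 h2 h3

theorem orig_le_clo {P : List (List Int)} {r c : Nat}
    (hr : r < pvRw P) (hc : c < pvCl P) : getC P r c ≤ clo P r c := by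
  have := le_clo (P := P) r c hr hc
  simpa [distN] using this

theorem distN_triangle (p q : Int × Int) (r c : Nat) :
    distN p r c ≤ |p.1 - q.1| + |p.2 - q.2| + distN q r c := by
  have h1 := abs_sub_le p.1 q.1 (r : Int)
  have h2 := abs_sub_le p.2 q.2 (c : Int)
  simp only [distN]; omega

theorem clo_lip {P : List (List Int)} (hR : 0 < pvRw P) (hC : 0 < pvCl P)
    (r c r' c' : Nat) :
    clo P r c - distN ((r : Int), (c : Int)) r' c' ≤ clo P r' c' := by
  rw [sub_le_iff_le_add]
  refine clo_le r c hR hC (fun r2 c2 h2 h3 => ?_)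
  have hle := le_clo (P := P) r' c' h2 h3
  have t1 := abs_sub_le ((r' : Int)) ((r : Int)) ((r2 : Int))
  have t2 := abs_sub_le ((c' : Int)) ((c : Int)) ((c2 : Int))
  have e1 : |(r' : Int) - (r : Int)| = |(r : Int) - (r' : Int)| := abs_sub_comm _ _
  have e2 : |(c' : Int) - (c : Int)| = |(c : Int) - (c' : Int)| := abs_sub_comm _ _
  simp only [distN] at hle ⊢
  omega
-- mirrors of the two ports (proof-only restatements, proved equal by rfl)
def alocP (P : List (List Int)) (st : List (List Int) × PySem.Set (Int × Int))
    (rc : Int × Int) : List (List Int) × PySem.Set (Int × Int) :=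
  if PySem.Set.contains st.2 rc then st
  else
    let v := PySem.List.pyGetD (PySem.List.pyGetD st.1 rc.1 []) rc.2 0
    (PySem.List.pyRange 0 (P.length : Int) 1).foldl (fun st r2 =>
      (PySem.List.pyRange 0 ((PySem.List.pyGetD P 0 []).length : Int) 1).foldl (fun st c2 =>
        let current := PySem.List.pyGetD (PySem.List.pyGetD st.1 r2 []) c2 0
        let ms := v - manhatten_dist rc (r2, c2)
        if current ≤ ms then
          (PySem.List.pySetD st.1 r2 (PySem.List.pySetD (PySem.List.pyGetD st.1 r2 []) c2 ms),
           PySem.Set.add st.2 (r2, c2))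
        else st) st) st

def dictA (P : List (List Int)) : PySem.Dict Int (List (Int × Int)) :=
  (PySem.List.pyRange 0 (P.length : Int) 1).foldl (fun d r =>
    (PySem.List.pyRange 0 ((PySem.List.pyGetD P 0 []).length : Int) 1).foldl (fun d c =>
      d.modify (PySem.List.pyGetD (PySem.List.pyGetD P r []) c 0) [] (· ++ [(r, c)])) d)
    PySem.Dict.empty

theorem portA_unfold (P : List (List Int)) :
    create_safe_puzzle P =
      ((PySem.List.sorted (dictA P).items (fun x => -x.1) false).foldl
        (fun st h => h.2.foldl (alocP P) st)
        (P, (PySem.Set.empty : PySem.Set (Int × Int)))).1 := rfl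

-- Nat-indexed form of A's relaxation step
def stepN (v : Int) (p : Int × Int) (st : List (List Int) × PySem.Set (Int × Int))
    (r2 c2 : Nat) : List (List Int) × PySem.Set (Int × Int) :=
  if getC st.1 r2 c2 ≤ v - distN p r2 c2 then
    (setC st.1 r2 c2 (v - distN p r2 c2), PySem.Set.add st.2 (((r2 : Int), (c2 : Int))))
  else st

def arelax (P : List (List Int)) (v : Int) (rc : Int × Int)
    (st : List (List Int) × PySem.Set (Int × Int)) : List (List Int) × PySem.Set (Int × Int) :=
  (List.range (pvRw P)).foldl (fun st r2 =>
    (List.range (pvCl P)).foldl (fun st c2 => stepN v rc st r2 c2) st) st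

def alocN (P : List (List Int)) (st : List (List Int) × PySem.Set (Int × Int))
    (rc : Int × Int) : List (List Int) × PySem.Set (Int × Int) :=
  if PySem.Set.contains st.2 rc then st
  else arelax P (PySem.List.pyGetD (PySem.List.pyGetD st.1 rc.1 []) rc.2 0) rc st

theorem alocP_eq_alocN (P : List (List Int)) (st : List (List Int) × PySem.Set (Int × Int))
    (rc : Int × Int) : alocP P st rc = alocN P st rc := by
  unfold alocP alocN
  split_ifs with h
  · rfl
  · simp only [arelax, PySem.List.pyGetD_zero, PySem.List.pyRange_zero_natCast, List.foldl_map,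
      PySem.List.pyGetD_natCast, PySem.List.pySetD_natCast, stepN, getC, setC, distN,
      manhatten_dist, pvRw, pvCl]
theorem stepN_row (P : List (List Int)) (v : Int) (p : Int × Int)
    (st0 : List (List Int) × PySem.Set (Int × Int)) (r : Nat) (n : Nat)
    (hsh : ShapeOf P st0.1) (hw : Wide P) (hr : r < pvRw P) (hn : n ≤ pvCl P) :
    ShapeOf P ((List.range n).foldl (fun st c2 => stepN v p st r c2) st0).1 ∧
    (∀ r' c' : Nat, getC ((List.range n).foldl (fun st c2 => stepN v p st r c2) st0).1 r' c' =
      if r' = r ∧ c' < n then max (getC st0.1 r' c') (v - distN p r' c') else getC st0.1 r' c') ∧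
    (∀ q : Int × Int, q ∈ ((List.range n).foldl (fun st c2 => stepN v p st r c2) st0).2 ↔
      q ∈ st0.2 ∨ ∃ c' : Nat, c' < n ∧ q = ((r : Int), (c' : Int)) ∧
        getC st0.1 r c' ≤ v - distN p r c') := by
  revert hn
  induction n with
  | zero =>
    intro _hn
    refine ⟨hsh, fun r' c' => by simp, fun q => by simp⟩
  | succ n ih =>
    intro hn
    obtain ⟨ihsh, ihget, ihmem⟩ := ih (Nat.le_of_succ_le hn)
    set S := (List.range n).foldl (fun st c2 => stepN v p st r c2) st0 with hS
    have hfold : (List.range (n + 1)).foldl (fun st c2 => stepN v p st r c2) st0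
        = stepN v p S r n := by
      rw [List.range_succ, List.foldl_append]; rfl
    have hSr : r < S.1.length := by rw [ihsh.1]; exact hr
    have hSn : n < (S.1.getD r []).length := by
      rw [ihsh.2 r]; exact lt_of_lt_of_le (Nat.lt_succ_self n) (le_trans hn (hw r hr))
    have hgetrn : getC S.1 r n = getC st0.1 r n := by
      rw [ihget r n]; simp
    rw [hfold]
    unfold stepN
    split_ifs with hb
    · -- the cell is relaxed
      rw [hgetrn] at hb
      refine ⟨shape_setC ihsh r n _, fun r' c' => ?_, fun q => ?_⟩
      · by_cases hrc : r' = r ∧ c' = n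
        · obtain ⟨h1, h2⟩ := hrc; subst h1; subst h2
          rw [getC_setC_self _ hSr hSn, if_pos ⟨rfl, Nat.lt_succ_self _⟩]
          omega
        · rw [getC_setC_ne _ hrc, ihget r' c']
          by_cases h1 : r' = r ∧ c' < n
          · rw [if_pos h1, if_pos ⟨h1.1, Nat.lt_succ_of_lt h1.2⟩]
          · rw [if_neg h1, if_neg (by omega)]
      · rw [PySem.Set.mem_add, ihmem q]
        constructor
        · rintro ((h | ⟨c', hc', rfl, hcond⟩) | rfl)
          · exact Or.inl h
          · exact Or.inr ⟨c', Nat.lt_succ_of_lt hc', rfl, hcond⟩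
          · exact Or.inr ⟨n, Nat.lt_succ_self n, rfl, hb⟩
        · rintro (h | ⟨c', hc', rfl, hcond⟩)
          · exact Or.inl (Or.inl h)
          · rcases Nat.lt_succ_iff_lt_or_eq.mp hc' with h' | rfl
            · exact Or.inl (Or.inr ⟨c', h', rfl, hcond⟩)
            · exact Or.inr rfl
    · -- no relaxation at (r, n)
      rw [hgetrn] at hb
      refine ⟨ihsh, fun r' c' => ?_, fun q => ?_⟩
      · rw [ihget r' c']
        by_cases h1 : r' = r ∧ c' < n
        · rw [if_pos h1, if_pos ⟨h1.1, Nat.lt_succ_of_lt h1.2⟩]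
        · by_cases h2 : r' = r ∧ c' < n + 1
          · have hcn : c' = n := by omega
            have h3 : r' = r := h2.1
            subst h3; subst hcn
            rw [if_neg h1, if_pos h2]
            omega
          · rw [if_neg h1, if_neg h2]
      · rw [ihmem q]
        constructor
        · rintro (h | ⟨c', hc', rfl, hcond⟩)
          · exact Or.inl h
          · exact Or.inr ⟨c', Nat.lt_succ_of_lt hc', rfl, hcond⟩
        · rintro (h | ⟨c', hc', rfl, hcond⟩)
          · exact Or.inl h
          · rcases Nat.lt_succ_iff_lt_or_eq.mp hc' with h' | rfl
            · exact Or.inr ⟨c', h', rfl, hcond⟩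
            · exact absurd hcond hb
theorem stepN_grid (P : List (List Int)) (v : Int) (p : Int × Int)
    (st0 : List (List Int) × PySem.Set (Int × Int)) (m : Nat)
    (hsh : ShapeOf P st0.1) (hw : Wide P) (hm : m ≤ pvRw P) :
    ShapeOf P ((List.range m).foldl (fun st r2 =>
        (List.range (pvCl P)).foldl (fun st c2 => stepN v p st r2 c2) st) st0).1 ∧
    (∀ r' c' : Nat, getC ((List.range m).foldl (fun st r2 =>
        (List.range (pvCl P)).foldl (fun st c2 => stepN v p st r2 c2) st) st0).1 r' c' =
      if r' < m ∧ c' < pvCl P then max (getC st0.1 r' c') (v - distN p r' c')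
      else getC st0.1 r' c') ∧
    (∀ q : Int × Int, q ∈ ((List.range m).foldl (fun st r2 =>
        (List.range (pvCl P)).foldl (fun st c2 => stepN v p st r2 c2) st) st0).2 ↔
      q ∈ st0.2 ∨ ∃ r' c' : Nat, r' < m ∧ c' < pvCl P ∧ q = ((r' : Int), (c' : Int)) ∧
        getC st0.1 r' c' ≤ v - distN p r' c') := by
  revert hm
  induction m with
  | zero =>
    intro _hm
    refine ⟨hsh, fun r' c' => by simp, fun q => by simp⟩
  | succ m ih =>
    intro hm
    obtain ⟨ihsh, ihget, ihmem⟩ := ih (Nat.le_of_succ_le hm)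
    set S := (List.range m).foldl (fun st r2 =>
      (List.range (pvCl P)).foldl (fun st c2 => stepN v p st r2 c2) st) st0 with hS
    have hfold : (List.range (m + 1)).foldl (fun st r2 =>
        (List.range (pvCl P)).foldl (fun st c2 => stepN v p st r2 c2) st) st0
        = (List.range (pvCl P)).foldl (fun st c2 => stepN v p st m c2) S := by
      rw [List.range_succ, List.foldl_append]; rfl
    have hmR : m < pvRw P := hm
    obtain ⟨rsh, rget, rmem⟩ :=
      stepN_row P v p S m (pvCl P) ihsh hw hmR (le_refl _)
    rw [hfold]
    have hSrow : ∀ c' : Nat, getC S.1 m c' = getC st0.1 m c' := by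
      intro c'; rw [ihget m c']; simp
    refine ⟨rsh, fun r' c' => ?_, fun q => ?_⟩
    · rw [rget r' c']
      by_cases h1 : r' = m
      · subst h1
        by_cases h2 : c' < pvCl P
        · rw [if_pos ⟨rfl, h2⟩, hSrow c', if_pos ⟨Nat.lt_succ_self r', h2⟩]
        · rw [if_neg (by omega), ihget r' c', if_neg (by omega), if_neg (by omega)]
      · rw [if_neg (by omega), ihget r' c']
        by_cases h2 : r' < m ∧ c' < pvCl P
        · rw [if_pos h2, if_pos ⟨Nat.lt_succ_of_lt h2.1, h2.2⟩]
        · rw [if_neg h2, if_neg (by omega)]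
    · rw [rmem q]
      constructor
      · rintro (h | ⟨b, hb, rfl, hcond⟩)
        · rcases (ihmem q).mp h with h' | ⟨a2, b2, ha2, hb2, rfl, hcond2⟩
          · exact Or.inl h'
          · exact Or.inr ⟨a2, b2, Nat.lt_succ_of_lt ha2, hb2, rfl, hcond2⟩
        · rw [hSrow b] at hcond
          exact Or.inr ⟨m, b, Nat.lt_succ_self m, hb, rfl, hcond⟩
      · rintro (h | ⟨a2, b2, ha2, hb2, rfl, hcond2⟩)
        · exact Or.inl ((ihmem _).mpr (Or.inl h))
        · rcases Nat.lt_succ_iff_lt_or_eq.mp ha2 with h' | heq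
          · exact Or.inl ((ihmem _).mpr (Or.inr ⟨a2, b2, h', hb2, rfl, hcond2⟩))
          · subst heq
            exact Or.inr ⟨b2, hb2, rfl, by rw [hSrow b2]; exact hcond2⟩

-- the write sweep of B: every window cell receives F r c (independent of the grid)
theorem setF_row (P : List (List Int)) (F : Nat → Nat → Int) (g : List (List Int))
    (r : Nat) (n : Nat) (hsh : ShapeOf P g) (hw : Wide P) (hr : r < pvRw P)
    (hn : n ≤ pvCl P) :
    ShapeOf P ((List.range n).foldl (fun g c => setC g r c (F r c)) g) ∧
    (∀ r' c' : Nat, getC ((List.range n).foldl (fun g c => setC g r c (F r c)) g) r' c' =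
      if r' = r ∧ c' < n then F r' c' else getC g r' c') := by
  revert hn
  induction n with
  | zero =>
    intro _hn
    refine ⟨hsh, fun r' c' => by simp⟩
  | succ n ih =>
    intro hn
    obtain ⟨ihsh, ihget⟩ := ih (Nat.le_of_succ_le hn)
    set G := (List.range n).foldl (fun g c => setC g r c (F r c)) g with hG
    have hfold : (List.range (n + 1)).foldl (fun g c => setC g r c (F r c)) g
        = setC G r n (F r n) := by
      rw [List.range_succ, List.foldl_append]; rfl
    have hGr : r < G.length := by rw [ihsh.1]; exact hr
    have hGn : n < (G.getD r []).length := by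
      rw [ihsh.2 r]; exact lt_of_lt_of_le (Nat.lt_succ_self n) (le_trans hn (hw r hr))
    rw [hfold]
    refine ⟨shape_setC ihsh r n _, fun r' c' => ?_⟩
    by_cases hrc : r' = r ∧ c' = n
    · obtain ⟨h1, h2⟩ := hrc; subst h1; subst h2
      rw [getC_setC_self _ hGr hGn, if_pos ⟨rfl, Nat.lt_succ_self _⟩]
    · rw [getC_setC_ne _ hrc, ihget r' c']
      by_cases h1 : r' = r ∧ c' < n
      · rw [if_pos h1, if_pos ⟨h1.1, Nat.lt_succ_of_lt h1.2⟩]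
      · rw [if_neg h1, if_neg (by omega)]

theorem setF_grid (P : List (List Int)) (F : Nat → Nat → Int) (g : List (List Int))
    (m : Nat) (hsh : ShapeOf P g) (hw : Wide P) (hm : m ≤ pvRw P) :
    ShapeOf P ((List.range m).foldl (fun g r =>
      (List.range (pvCl P)).foldl (fun g c => setC g r c (F r c)) g) g) ∧
    (∀ r' c' : Nat, getC ((List.range m).foldl (fun g r =>
      (List.range (pvCl P)).foldl (fun g c => setC g r c (F r c)) g) g) r' c' =
      if r' < m ∧ c' < pvCl P then F r' c' else getC g r' c') := by
  revert hm
  induction m with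
  | zero =>
    intro _hm
    refine ⟨hsh, fun r' c' => by simp⟩
  | succ m ih =>
    intro hm
    obtain ⟨ihsh, ihget⟩ := ih (Nat.le_of_succ_le hm)
    set G := (List.range m).foldl (fun g r =>
      (List.range (pvCl P)).foldl (fun g c => setC g r c (F r c)) g) g with hG
    have hfold : (List.range (m + 1)).foldl (fun g r =>
        (List.range (pvCl P)).foldl (fun g c => setC g r c (F r c)) g) g
        = (List.range (pvCl P)).foldl (fun g c => setC g m c (F m c)) G := by
      rw [List.range_succ, List.foldl_append]; rfl
    obtain ⟨rsh, rget⟩ := setF_row P F G m (pvCl P) ihsh hw hm (le_refl _)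
    rw [hfold]
    refine ⟨rsh, fun r' c' => ?_⟩
    rw [rget r' c']
    by_cases h1 : r' = m
    · subst h1
      by_cases h2 : c' < pvCl P
      · rw [if_pos ⟨rfl, h2⟩, if_pos ⟨Nat.lt_succ_self r', h2⟩]
      · rw [if_neg (by omega), ihget r' c', if_neg (by omega), if_neg (by omega)]
    · rw [if_neg (by omega), ihget r' c']
      by_cases h2 : r' < m ∧ c' < pvCl P
      · rw [if_pos h2, if_pos ⟨Nat.lt_succ_of_lt h2.1, h2.2⟩]
      · rw [if_neg h2, if_neg (by omega)]
-- invariant carried through A's greedy propagation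
def CoveredN (P g : List (List Int)) (r c : Nat) : Prop :=
  ∀ r' c' : Nat, r' < pvRw P → c' < pvCl P →
    getC P r c - distN ((r : Int), (c : Int)) r' c' ≤ getC g r' c'

def InvA (P : List (List Int)) (st : List (List Int) × PySem.Set (Int × Int)) : Prop :=
  ShapeOf P st.1 ∧
  (∀ r c : Nat, r < pvRw P → c < pvCl P →
    getC P r c ≤ getC st.1 r c ∧ getC st.1 r c ≤ clo P r c) ∧
  (∀ r c : Nat, ¬(r < pvRw P ∧ c < pvCl P) → getC st.1 r c = getC P r c) ∧
  (∀ q ∈ st.2, ∃ r c : Nat, r < pvRw P ∧ c < pvCl P ∧ q = ((r : Int), (c : Int)) ∧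
    CoveredN P st.1 r c)

theorem alocN_spec (P : List (List Int)) (hw : Wide P)
    (st : List (List Int) × PySem.Set (Int × Int)) (r c : Nat)
    (hr : r < pvRw P) (hc : c < pvCl P) (hin : InvA P st) :
    InvA P (alocN P st ((r : Int), (c : Int))) ∧
    (∀ q ∈ st.2, q ∈ (alocN P st ((r : Int), (c : Int))).2) ∧
    ((r : Int), (c : Int)) ∈ (alocN P st ((r : Int), (c : Int))).2 := by
  obtain ⟨hsh, hbnd, hout, hmem⟩ := hin
  have hR : 0 < pvRw P := Nat.pos_of_ne_zero (by omega)
  have hC : 0 < pvCl P := Nat.pos_of_ne_zero (by omega)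
  unfold alocN
  by_cases hct : PySem.Set.contains st.2 ((r : Int), (c : Int))
  · rw [if_pos hct]
    exact ⟨⟨hsh, hbnd, hout, hmem⟩, fun q hq => hq, (PySem.Set.contains_iff _ _).mp hct⟩
  · rw [if_neg hct]
    have hv : PySem.List.pyGetD (PySem.List.pyGetD st.1 ((r : Int), (c : Int)).1 [])
        ((r : Int), (c : Int)).2 0 = getC st.1 r c := by
      simp [getC]
    rw [hv]
    set v := getC st.1 r c with hvdef
    have hvlo : getC P r c ≤ v := (hbnd r c hr hc).1
    have hvhi : v ≤ clo P r c := (hbnd r c hr hc).2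
    obtain ⟨gsh, gget, gmem⟩ :=
      stepN_grid P v ((r : Int), (c : Int)) st (pvRw P) hsh hw (le_refl _)
    set res := arelax P v ((r : Int), (c : Int)) st with hres
    have hresdef : res = (List.range (pvRw P)).foldl (fun st r2 =>
        (List.range (pvCl P)).foldl (fun st c2 =>
          stepN v ((r : Int), (c : Int)) st r2 c2) st) st := rfl
    rw [hresdef] at *
    have hmono : ∀ a b : Nat, getC st.1 a b ≤
        getC ((List.range (pvRw P)).foldl (fun st r2 =>
          (List.range (pvCl P)).foldl (fun st c2 =>
            stepN v ((r : Int), (c : Int)) st r2 c2) st) st).1 a b := by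
      intro a b
      rw [gget a b]
      by_cases h : a < pvRw P ∧ b < pvCl P
      · rw [if_pos h]; exact le_max_left _ _
      · rw [if_neg h]
    refine ⟨⟨gsh, ?_, ?_, ?_⟩, ?_, ?_⟩
    · -- window bounds
      intro a b ha hb
      rw [gget a b, if_pos ⟨ha, hb⟩]
      constructor
      · exact le_trans (hbnd a b ha hb).1 (le_max_left _ _)
      · refine max_le (hbnd a b ha hb).2 ?_
        have h1 : v - distN ((r : Int), (c : Int)) a b ≤
            clo P r c - distN ((r : Int), (c : Int)) a b := by omega
        exact le_trans h1 (clo_lip hR hC r c a b)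
    · -- outside the window nothing changed
      intro a b hab
      rw [gget a b, if_neg hab]
      exact hout a b hab
    · -- every marked location is covered
      intro q hq
      rcases (gmem q).mp hq with hold | ⟨a, b, ha, hb, rfl, hcond⟩
      · obtain ⟨a, b, ha, hb, rfl, hcov⟩ := hmem q hold
        exact ⟨a, b, ha, hb, rfl, fun x y hx hy =>
          le_trans (hcov x y hx hy) (hmono x y)⟩
      · refine ⟨a, b, ha, hb, rfl, fun x y hx hy => ?_⟩
        rw [gget x y, if_pos ⟨hx, hy⟩]
        have htri := distN_triangle ((r : Int), (c : Int)) ((a : Int), (b : Int)) x y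
        have habv : |((r : Int), (c : Int)).1 - ((a : Int), (b : Int)).1| +
            |((r : Int), (c : Int)).2 - ((a : Int), (b : Int)).2|
            = distN ((r : Int), (c : Int)) a b := rfl
        rw [habv] at htri
        have h1 : getC P a b ≤ getC st.1 a b := (hbnd a b ha hb).1
        have h2 : getC P a b - distN ((a : Int), (b : Int)) x y ≤
            v - distN ((r : Int), (c : Int)) x y := by omega
        exact le_trans h2 (le_max_right _ _)
    · -- the marked set only grows
      intro q hq
      exact (gmem q).mpr (Or.inl hq)
    · -- the processed location is marked afterwards
      refine (gmem _).mpr (Or.inr ⟨r, c, hr, hc, rfl, ?_⟩)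
      have h0 : distN ((r : Int), (c : Int)) r c = 0 := by simp [distN]
      omega

theorem afold_locs (P : List (List Int)) (hw : Wide P) (qs : List (Int × Int)) :
    ∀ st : List (List Int) × PySem.Set (Int × Int), InvA P st →
      (∀ q ∈ qs, ∃ r c : Nat, r < pvRw P ∧ c < pvCl P ∧ q = ((r : Int), (c : Int))) →
      InvA P (qs.foldl (alocN P) st) ∧
      (∀ q ∈ st.2, q ∈ (qs.foldl (alocN P) st).2) ∧
      (∀ q ∈ qs, q ∈ (qs.foldl (alocN P) st).2) := by
  induction qs with
  | nil => exact fun st hin _ => ⟨hin, fun q hq => hq, fun q hq => absurd hq (by simp)⟩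
  | cons q qs ih =>
    intro st hin hwin
    obtain ⟨r, c, hr, hc, rfl⟩ := hwin q List.mem_cons_self
    obtain ⟨hin', hsub', hq'⟩ := alocN_spec P hw st r c hr hc hin
    obtain ⟨hinf, hsubf, hallf⟩ := ih (alocN P st ((r : Int), (c : Int))) hin'
      (fun q hq => hwin q (List.mem_cons_of_mem _ hq))
    refine ⟨hinf, fun q2 hq2 => hsubf _ (hsub' q2 hq2), fun q2 hq2 => ?_⟩
    rcases List.mem_cons.mp hq2 with rfl | hq2'
    · exact hsubf _ hq'
    · exact hallf q2 hq2'

theorem afold_items (P : List (List Int)) (hw : Wide P)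
    (L : List (Int × List (Int × Int))) :
    ∀ st : List (List Int) × PySem.Set (Int × Int), InvA P st →
      (∀ h ∈ L, ∀ q ∈ h.2, ∃ r c : Nat, r < pvRw P ∧ c < pvCl P ∧ q = ((r : Int), (c : Int))) →
      InvA P (L.foldl (fun st h => h.2.foldl (alocN P) st) st) ∧
      (∀ q ∈ st.2, q ∈ (L.foldl (fun st h => h.2.foldl (alocN P) st) st).2) ∧
      (∀ h ∈ L, ∀ q ∈ h.2, q ∈ (L.foldl (fun st h => h.2.foldl (alocN P) st) st).2) := by
  induction L with
  | nil =>
    exact fun st hin _ => ⟨hin, fun q hq => hq, fun h hh => absurd hh (by simp)⟩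
  | cons it L ih =>
    intro st hin hwin
    obtain ⟨hin', hsub', hall'⟩ := afold_locs P hw it.2 st hin
      (fun q hq => hwin it List.mem_cons_self q hq)
    obtain ⟨hinf, hsubf, hallf⟩ := ih (it.2.foldl (alocN P) st) hin'
      (fun h hh q hq => hwin h (List.mem_cons_of_mem _ hh) q hq)
    refine ⟨hinf, fun q hq => hsubf q (hsub' q hq), fun h hh q hq => ?_⟩
    rcases List.mem_cons.mp hh with rfl | hh'
    · exact hsubf q (hall' q hq)
    · exact hallf h hh' q hq
-- the grouping dict of A: every window cell is recorded under its original value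
def cellsLL (P : List (List Int)) : List (Int × (Int × Int)) :=
  (List.range (pvRw P)).flatMap (fun r =>
    (List.range (pvCl P)).map (fun c => (getC P r c, ((r : Int), (c : Int)))))

theorem dictA_eq (P : List (List Int)) :
    dictA P = (cellsLL P).foldl (fun d p => d.modify p.1 [] (· ++ [p.2]))
      PySem.Dict.empty := by
  unfold dictA cellsLL
  simp only [PySem.List.pyGetD_zero, PySem.List.pyRange_zero_natCast, List.foldl_map,
    List.foldl_flatMap, PySem.List.pyGetD_natCast, getC, pvRw, pvCl]

theorem mem_cellsLL_iff (P : List (List Int)) (x : Int × (Int × Int)) :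
    x ∈ cellsLL P ↔ ∃ r c : Nat, r < pvRw P ∧ c < pvCl P ∧
      x = (getC P r c, ((r : Int), (c : Int))) := by
  simp only [cellsLL, List.mem_flatMap, List.mem_map, List.mem_range]
  constructor
  · rintro ⟨r, hr, c, hc, rfl⟩; exact ⟨r, c, hr, hc, rfl⟩
  · rintro ⟨r, c, hr, hc, rfl⟩; exact ⟨r, hr, c, hc, rfl⟩

theorem nodup_keys_dictA (P : List (List Int)) : (dictA P).keys.Nodup := by
  rw [dictA_eq]
  exact PySem.Dict.nodup_keys_foldl_modify_key (cellsLL P) Prod.fst []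
    (fun _ p => (· ++ [p.2])) PySem.Dict.empty PySem.Dict.nodup_keys_empty

theorem mem_getD_dictA (P : List (List Int)) (r c : Nat)
    (hr : r < pvRw P) (hc : c < pvCl P) :
    ((r : Int), (c : Int)) ∈ (dictA P).getD (getC P r c) [] := by
  rw [dictA_eq, PySem.Dict.getD_foldl_modify_append, PySem.Dict.getD_empty]
  simp only [List.nil_append, List.mem_map]
  refine ⟨(getC P r c, ((r : Int), (c : Int))), ?_, rfl⟩
  rw [List.mem_filter]
  exact ⟨(mem_cellsLL_iff P _).mpr ⟨r, c, hr, hc, rfl⟩, by simp⟩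

theorem key_mem_dictA (P : List (List Int)) (r c : Nat)
    (hr : r < pvRw P) (hc : c < pvCl P) : getC P r c ∈ (dictA P).keys := by
  rw [dictA_eq, PySem.Dict.keys_foldl_modify_key (cellsLL P) Prod.fst []
    (fun _ p => (· ++ [p.2])) PySem.Dict.empty]
  rw [PySem.Dict.keys_empty, PySem.Set.update_nil_left, PySem.Set.mem_ofList]
  exact List.mem_map.mpr ⟨(getC P r c, ((r : Int), (c : Int))),
    (mem_cellsLL_iff P _).mpr ⟨r, c, hr, hc, rfl⟩, rfl⟩

theorem cell_in_some_item (P : List (List Int)) (r c : Nat)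
    (hr : r < pvRw P) (hc : c < pvCl P) :
    ∃ pr ∈ (dictA P).items, ((r : Int), (c : Int)) ∈ pr.2 := by
  refine ⟨(getC P r c, (dictA P).getD (getC P r c) []), ?_, mem_getD_dictA P r c hr hc⟩
  rw [PySem.Dict.items_eq_map_keys (dictA P) (nodup_keys_dictA P) []]
  exact List.mem_map.mpr ⟨getC P r c, key_mem_dictA P r c hr hc, rfl⟩

theorem items_window (P : List (List Int)) :
    ∀ pr ∈ (dictA P).items, ∀ q ∈ pr.2,
      ∃ r c : Nat, r < pvRw P ∧ c < pvCl P ∧ q = ((r : Int), (c : Int)) := by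
  intro pr hpr q hq
  rw [PySem.Dict.items_eq_map_keys (dictA P) (nodup_keys_dictA P) []] at hpr
  obtain ⟨k, hk, rfl⟩ := List.mem_map.mp hpr
  rw [dictA_eq, PySem.Dict.getD_foldl_modify_append, PySem.Dict.getD_empty,
    List.nil_append] at hq
  obtain ⟨x, hx, rfl⟩ := List.mem_map.mp hq
  obtain ⟨hxc, _⟩ := List.mem_filter.mp hx
  obtain ⟨r, c, hr, hc, rfl⟩ := (mem_cellsLL_iff P _).mp hxc
  exact ⟨r, c, hr, hc, rfl⟩

-- extensionality for grids of the same shape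
theorem grid_ext {P g g' : List (List Int)} (h : ShapeOf P g) (h' : ShapeOf P g')
    (hc : ∀ r c : Nat, getC g r c = getC g' r c) : g = g' := by
  apply List.ext_getElem (h.1.trans h'.1.symm)
  intro i h1 h2
  apply List.ext_getElem
  · have := (h.2 i).trans (h'.2 i).symm
    rw [List.getD_eq_getElem _ _ h1, List.getD_eq_getElem _ _ h2] at this
    exact this
  · intro j hj1 hj2
    have := hc i j
    rw [getC, getC, List.getD_eq_getElem _ _ h1, List.getD_eq_getElem _ _ h2,
      List.getD_eq_getElem _ _ hj1, List.getD_eq_getElem _ _ hj2] at this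
    exact this

theorem distN_comm (r c r' c' : Nat) :
    distN ((r : Int), (c : Int)) r' c' = distN ((r' : Int), (c' : Int)) r c := by
  simp only [distN]
  rw [abs_sub_comm ((r : Int)) ((r' : Int)), abs_sub_comm ((c : Int)) ((c' : Int))]

-- characterization of A's result
theorem portA_spec (P : List (List Int)) (hw : Wide P) :
    ShapeOf P (create_safe_puzzle P) ∧
    (∀ r c : Nat, getC (create_safe_puzzle P) r c =
      if r < pvRw P ∧ c < pvCl P then clo P r c else getC P r c) := by
  have halocs : alocP P = alocN P := funext fun st => funext fun rc => alocP_eq_alocN P st rc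
  have hun : create_safe_puzzle P =
      ((PySem.List.sorted (dictA P).items (fun x => -x.1) false).foldl
        (fun st h => h.2.foldl (alocN P) st)
        (P, (PySem.Set.empty : PySem.Set (Int × Int)))).1 := by
    rw [portA_unfold, halocs]
  have hinv0 : InvA P (P, (PySem.Set.empty : PySem.Set (Int × Int))) := by
    refine ⟨shape_refl P, fun r c hr hc => ⟨le_refl _, orig_le_clo hr hc⟩,
      fun r c _ => rfl, fun q hq => absurd hq ?_⟩
    simp [PySem.Set.empty]
  have hwin : ∀ h ∈ PySem.List.sorted (dictA P).items (fun x => -x.1) false,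
      ∀ q ∈ h.2, ∃ r c : Nat, r < pvRw P ∧ c < pvCl P ∧ q = ((r : Int), (c : Int)) := by
    intro h hh q hq
    exact items_window P h ((PySem.List.mem_sorted _ _ _ _).mp hh) q hq
  obtain ⟨hinv, _, hall⟩ := afold_items P hw
    (PySem.List.sorted (dictA P).items (fun x => -x.1) false)
    (P, (PySem.Set.empty : PySem.Set (Int × Int))) hinv0 hwin
  obtain ⟨hsh, hbnd, hout, hmem⟩ := hinv
  rw [hun] at *
  refine ⟨hsh, fun a b => ?_⟩
  by_cases hab : a < pvRw P ∧ b < pvCl P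
  · rw [if_pos hab]
    refine le_antisymm ((hbnd a b hab.1 hab.2).2) ?_
    have hR : 0 < pvRw P := by omega
    have hC : 0 < pvCl P := by omega
    refine clo_le a b hR hC (fun r c hr hc => ?_)
    -- the cell (r, c) ends up in the marked set, hence it is covered
    obtain ⟨pr, hpr, hqpr⟩ := cell_in_some_item P r c hr hc
    have hmemS : ((r : Int), (c : Int)) ∈
        ((PySem.List.sorted (dictA P).items (fun x => -x.1) false).foldl
          (fun st h => h.2.foldl (alocN P) st)
          (P, (PySem.Set.empty : PySem.Set (Int × Int)))).2 :=
      hall pr ((PySem.List.mem_sorted _ _ _ _).mpr hpr) _ hqpr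
    obtain ⟨r0, c0, hr0, hc0, heq, hcov⟩ := hmem _ hmemS
    have hrr : r0 = r ∧ c0 = c := by
      rw [Prod.mk.injEq] at heq
      exact ⟨Nat.cast_injective heq.1.symm, Nat.cast_injective heq.2.symm⟩
    obtain ⟨h1, h2⟩ := hrr; subst h1; subst h2
    have hcv := hcov a b hab.1 hab.2
    rw [distN_comm] at hcv
    exact hcv
  · rw [if_neg hab]
    exact hout a b hab
-- characterization of B's result
def valsB (P : List (List Int)) : List (List Int) :=
  (PySem.List.pyRange 0 (P.length : Int) 1).map (fun r =>
    (PySem.List.pyRange 0 ((PySem.List.pyGetD P 0 []).length : Int) 1).map (fun c =>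
      PySem.List.pyGetD (PySem.List.pyGetD P r []) c 0))

def bval (P : List (List Int)) (r c : Int) : Int :=
  pymax ((PySem.List.pyRange 0 (P.length : Int) 1).flatMap (fun r2 =>
    (PySem.List.pyRange 0 ((PySem.List.pyGetD P 0 []).length : Int) 1).map (fun c2 =>
      PySem.List.pyGetD (PySem.List.pyGetD (valsB P) r2 []) c2 0 - |r - r2| - |c - c2|)))

theorem portB_unfold (P : List (List Int)) :
    create_safe_puzzle_alt P =
      (PySem.List.pyRange 0 (P.length : Int) 1).foldl (fun g r =>
        (PySem.List.pyRange 0 ((PySem.List.pyGetD P 0 []).length : Int) 1).foldl (fun g c =>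
          PySem.List.pySetD g r
            (PySem.List.pySetD (PySem.List.pyGetD g r []) c (bval P r c))) g) P := rfl

theorem cols_cast (P : List (List Int)) :
    ((PySem.List.pyGetD P 0 []).length : Int) = (((P.getD 0 []).length : Nat) : Int) := by
  rw [PySem.List.pyGetD_zero]

theorem valsB_getC (P : List (List Int)) (r2 c2 : Nat)
    (h2 : r2 < pvRw P) (h3 : c2 < pvCl P) :
    PySem.List.pyGetD (PySem.List.pyGetD (valsB P) ((r2 : Int)) []) ((c2 : Int)) 0
      = getC P r2 c2 := by
  unfold valsB
  rw [cols_cast]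
  rw [PySem.List.pyGetD_map_pyRange _ P.length r2 [] h2]
  rw [PySem.List.pyGetD_map_pyRange _ (P.getD 0 []).length c2 0 h3]
  simp [getC]

theorem bval_eq_clo (P : List (List Int)) (r c : Nat) :
    bval P ((r : Int)) ((c : Int)) = clo P r c := by
  unfold bval clo cloL
  congr 1
  simp only [pvRw, pvCl]
  rw [cols_cast, PySem.List.pyRange_zero_natCast P.length,
    PySem.List.pyRange_zero_natCast (P.getD 0 []).length]
  rw [List.flatMap_map]
  rw [List.flatMap_def, List.flatMap_def]
  refine congrArg List.flatten (List.map_congr_left (fun r2 hr2 => ?_))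
  rw [List.mem_range] at hr2
  rw [List.map_map]
  refine List.map_congr_left (fun c2 hc2 => ?_)
  rw [List.mem_range] at hc2
  simp only [Function.comp]
  rw [valsB_getC P r2 c2 hr2 hc2]

theorem portB_spec (P : List (List Int)) (hw : Wide P) :
    ShapeOf P (create_safe_puzzle_alt P) ∧
    (∀ r c : Nat, getC (create_safe_puzzle_alt P) r c =
      if r < pvRw P ∧ c < pvCl P then clo P r c else getC P r c) := by
  have hB : create_safe_puzzle_alt P =
      (List.range (pvRw P)).foldl (fun g r =>
        (List.range (pvCl P)).foldl (fun g c => setC g r c (clo P r c)) g) P := by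
    rw [portB_unfold, cols_cast]
    simp only [PySem.List.pyRange_zero_natCast, List.foldl_map,
      PySem.List.pyGetD_natCast, PySem.List.pySetD_natCast, bval_eq_clo, setC, pvRw, pvCl]
  obtain ⟨hsh, hget⟩ := setF_grid P (fun r c => clo P r c) P (pvRw P)
    (shape_refl P) hw (le_refl _)
  rw [hB]
  exact ⟨hsh, hget⟩

theorem wide_of_pre (P : List (List Int)) (hpre : Pre_create_safe_puzzle P) : Wide P := by
  intro r hr
  have hmem : P.getD r [] ∈ P := by
    rw [List.getD_eq_getElem _ _ hr]
    exact List.getElem_mem hr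
  exact hpre.2 (P.getD r []) hmem
-- ===== VERDICT (by name: the statement is the Claim_ definition above) =====
theorem create_safe_puzzle_spec : Claim_equal_create_safe_puzzle := by
  intro P _hdom hpre
  show create_safe_puzzle P = create_safe_puzzle_alt P
  have hw : Wide P := wide_of_pre P hpre
  obtain ⟨hshA, hgetA⟩ := portA_spec P hw
  obtain ⟨hshB, hgetB⟩ := portB_spec P hw
  exact grid_ext hshA hshB (fun r c => (hgetA r c).trans (hgetB r c).symm)
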